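-- pv_equiv track=rewrite | github.com/EdisonScientific/hypotest | src/hypotest/env/tools/filesystem.py | _format_lines_with_numbers
-- ===== SOURCE A (Python) =====
-- MAX_LINE_LENGTH = 2000  # Truncate lines longer than this
--
-- MAX_TOTAL_CHARS = 30000  # Roughly 30KB max output
--
-- def _format_lines_with_numbers(lines: list[str], offset: int | None) -> str:
--     """Format lines with line numbers and apply content protections.
--
--     Args:
--         lines: List of lines to format
--         offset: Starting line number offset (0-indexed)
--
--     Returns:
--         Formatted string with line numbers
--     """
--     result = []
--     actual_start = offset or 0
--     total_chars = 0
--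
--     for i, line in enumerate(lines, start=actual_start + 1):
--         # Remove trailing newline for formatting
--         content = line.rstrip("\n\r")
--
--         # Truncate very long lines
--         if len(content) > MAX_LINE_LENGTH:
--             content = content[:MAX_LINE_LENGTH] + " [line truncated - too long]"
--
--         # Format line with line number
--         formatted_line = f"{i}→{content}"
--
--         # Check if adding this line would exceed total character limit
--         if total_chars + len(formatted_line) + 1 > MAX_TOTAL_CHARS:
--             result.append(
--                 "[Content truncated - output too large. Use offset/limit parameters to read specific portions.]"
--             )
--             break
--
--         result.append(formatted_line)
--         total_chars += len(formatted_line) + 1  # +1 for newline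
--
--     return "\n".join(result)
-- ===== SOURCE B (Python) =====
-- MAX_LINE_LENGTH = 2000
--
-- MAX_TOTAL_CHARS = 30000
--
-- _TRUNCATION_SENTINEL = (
--     "[Content truncated - output too large. Use offset/limit parameters to read specific portions.]"
-- )
--
--
-- def _format_lines_with_numbers(lines: list[str], offset: int | None) -> str:
--     """Build all formatted lines first, then cut at the first prefix sum over the budget."""
--     start = (offset or 0) + 1
--     formatted = []
--     for k, line in enumerate(lines):
--         content = line.rstrip("\n\r")
--         if len(content) > MAX_LINE_LENGTH:
--             content = content[:MAX_LINE_LENGTH] + " [line truncated - too long]"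
--         formatted.append(f"{start + k}→{content}")
--     # inclusive prefix sums of len(f) + 1 (the newline that would follow each line)
--     sums = []
--     acc = 0
--     for f in formatted:
--         acc += len(f) + 1
--         sums.append(acc)
--     cut = next((j for j, s in enumerate(sums) if s > MAX_TOTAL_CHARS), None)
--     if cut is None:
--         return "\n".join(formatted)
--     return "\n".join(formatted[:cut] + [_TRUNCATION_SENTINEL])
-- ===== Notes on version B (the rewrite author's own statement) =====
-- stated objective: alternative
-- what changed: Replaces A's fused format-and-check loop with break by a build-all / inclusive-prefix-sum / first-cutoff-index decomposition: all formatted lines are computed first, then the output is cut at the first index whose cumulative length exceeds MAX_TOTAL_CHARS.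
import Mathlib
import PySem

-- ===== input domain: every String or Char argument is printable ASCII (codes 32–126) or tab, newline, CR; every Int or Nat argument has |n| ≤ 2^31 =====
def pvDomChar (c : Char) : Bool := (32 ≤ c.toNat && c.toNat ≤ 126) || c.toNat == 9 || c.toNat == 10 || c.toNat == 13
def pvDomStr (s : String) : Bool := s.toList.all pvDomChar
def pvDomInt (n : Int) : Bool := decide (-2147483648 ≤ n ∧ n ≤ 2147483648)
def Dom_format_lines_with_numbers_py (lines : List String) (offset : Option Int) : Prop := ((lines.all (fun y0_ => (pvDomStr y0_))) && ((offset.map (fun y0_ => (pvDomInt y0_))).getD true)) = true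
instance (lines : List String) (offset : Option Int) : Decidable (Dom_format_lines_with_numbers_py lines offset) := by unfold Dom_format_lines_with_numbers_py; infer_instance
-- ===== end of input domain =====

-- B rebuilds the same output by a build-all / prefix-sum / first-cutoff decomposition instead of A's fused loop with break.

-- shared per-line formatting (identical code in both Pythons):
-- content = line.rstrip("\n\r")  — exact hand port: drop trailing '\n'/'\r' characters
-- then truncate at MAX_LINE_LENGTH and prepend f"{i}→"
def pvFmtChars (i : Int) (line : String) : List Char :=
  let content := (line.toList.reverse.dropWhile (fun c => c == '\n' || c == '\r')).reverse
  let content := if content.length > 2000 then content.take 2000 ++ " [line truncated - too long]".toList else content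
  (PySem.Int.toChars i) ++ ('→' :: content)

def pvSentinel : String := "[Content truncated - output too large. Use offset/limit parameters to read specific portions.]"

-- ===== PORT A =====
-- the for-loop with running total and break
def pvLoopA : List String → Int → Int → List String
  | [], _, _ => []
  | line :: rest, i, total =>
    let f := pvFmtChars i line
    if total + (f.length : Int) + 1 > 30000 then [pvSentinel]
    else String.ofList f :: pvLoopA rest (i + 1) (total + (f.length : Int) + 1)

def format_lines_with_numbers_py (lines : List String) (offset : Option Int) : String :=
  -- actual_start = offset or 0  (0 is falsy, so this equals getD 0)
  let actual_start := offset.getD 0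
  PySem.Str.join "\n" (pvLoopA lines (actual_start + 1) 0)

-- ===== PORT B =====
-- inclusive prefix sums (Source B's acc loop over `formatted`)
def pvAccum : List Int → Int → List Int
  | [], _ => []
  | x :: xs, acc => (acc + x) :: pvAccum xs (acc + x)

def format_lines_with_numbers_py_alt (lines : List String) (offset : Option Int) : String :=
  let start := offset.getD 0 + 1  -- (offset or 0) + 1; 0 is falsy, so `or` equals getD 0
  let formatted := (PySem.List.enumerate lines 0).map (fun p => pvFmtChars (start + p.1) p.2)
  let sums := pvAccum (formatted.map (fun f => (f.length : Int) + 1)) 0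
  match sums.findIdx? (fun s => s > 30000) with
  | none => PySem.Str.join "\n" (formatted.map String.ofList)
  | some j => PySem.Str.join "\n" ((formatted.take j).map String.ofList ++ [pvSentinel])

-- ===== PRECONDITION & SPEC =====
def Spec_format_lines_with_numbers_py (lines : List String) (offset : Option Int) (out : String) : Prop := out = format_lines_with_numbers_py_alt lines offset
instance (lines : List String) (offset : Option Int) (out : String) : Decidable (Spec_format_lines_with_numbers_py lines offset out) := by unfold Spec_format_lines_with_numbers_py; infer_instance

-- ===== CLAIM (what is proved, stated in full; the proofs are below) =====
def Claim_equal_format_lines_with_numbers_py : Prop := ∀ (lines : List String) (offset : Option Int), Dom_format_lines_with_numbers_py lines offset → Spec_format_lines_with_numbers_py lines offset (format_lines_with_numbers_py lines offset)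

-- ===== LEMMAS AND PROOFS =====

-- B's result list, as a function of the formatted lines and the running total
def pvCut (fm : List (List Char)) (total : Int) : List String :=
  match (pvAccum (fm.map (fun f => (f.length : Int) + 1)) total).findIdx? (fun s => s > 30000) with
  | none => fm.map String.ofList
  | some j => (fm.take j).map String.ofList ++ [pvSentinel]

-- the formatted lines, built by structural recursion with an explicit counter
def pvFmtList : List String → Int → List (List Char)
  | [], _ => []
  | l :: ls, i => pvFmtChars i l :: pvFmtList ls (i + 1)

theorem enum_map_eq (lines : List String) : ∀ (s t : Int),
    (PySem.List.enumerate lines t).map (fun p => pvFmtChars (s + p.1) p.2) = pvFmtList lines (s + t) := by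
  induction lines with
  | nil => intro s t; simp [PySem.List.enumerate, pvFmtList]
  | cons l ls ih =>
    intro s t
    simp only [PySem.List.enumerate, List.map_cons, pvFmtList]
    rw [ih s (t + 1), add_assoc]

theorem loopA_eq (lines : List String) : ∀ (i total : Int),
    pvLoopA lines i total = pvCut (pvFmtList lines i) total := by
  induction lines with
  | nil => intro i total; simp [pvLoopA, pvFmtList, pvCut, pvAccum]
  | cons l ls ih =>
    intro i total
    simp only [pvLoopA, pvFmtList, pvCut, List.map_cons, pvAccum, List.findIdx?_cons]
    by_cases h : total + ((pvFmtChars i l).length : Int) + 1 > 30000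
    · have hc : (30000 : Int) < total + (((pvFmtChars i l).length : Int) + 1) := by omega
      simp [h, hc]
    · have hc : ¬ ((30000 : Int) < total + (((pvFmtChars i l).length : Int) + 1)) := by omega
      have harith : total + ((pvFmtChars i l).length : Int) + 1 = total + (((pvFmtChars i l).length : Int) + 1) := by ring
      rw [if_neg h, ih (i + 1) (total + ((pvFmtChars i l).length : Int) + 1), harith]
      simp only [pvCut, hc, if_false, decide_false, Bool.false_eq_true]
      cases hfi : (pvAccum ((pvFmtList ls (i + 1)).map (fun f => ((f.length : Int) + 1))) (total + (((pvFmtChars i l).length : Int) + 1))).findIdx? (fun s => s > 30000) with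
      | none => simp
      | some j => simp

-- ===== VERDICT (by name: the statement is the Claim_ definition above) =====
theorem format_lines_with_numbers_py_spec : Claim_equal_format_lines_with_numbers_py := by
  intro lines offset _
  unfold Spec_format_lines_with_numbers_py
  simp only [format_lines_with_numbers_py, format_lines_with_numbers_py_alt]
  rw [loopA_eq]
  rw [show (PySem.List.enumerate lines 0).map (fun p => pvFmtChars (offset.getD 0 + 1 + p.1) p.2) = pvFmtList lines (offset.getD 0 + 1) by
    simpa using enum_map_eq lines (offset.getD 0 + 1) 0]
  simp only [pvCut]
  cases (pvAccum ((pvFmtList lines (offset.getD 0 + 1)).map (fun f => ((f.length : Int) + 1))) 0).findIdx? (fun s => s > 30000) <;> rfl
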